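-- pv_equiv track=rewrite | github.com/jmoggridge/bioinfo-notebooks | BA2_E- Greedy Motif Search w Pseudocounts.py | Greedy_motif_search_w_pseudocounts
-- ===== SOURCE A (Python) =====
-- def Greedy_motif_search_w_pseudocounts(Seqs,k):
--     """ Greedy motif search...
--         *select a kmer from first string
--             *look at next string, find best k-mer using profile_matrix
--             *update profile matrix*, move to next sequence
--         *check motif alignment's total Hamming distance, save [Motifs set]
--         save [Motifs] with the smallest Hamming distance
--
--     """
--
--     def Build_profile_matrix(motifs, k):
--
--         """Returns profile matrix (k,bases) given motifs"""
--         ### PSEUDOCOUNTERS ENTERED WHILE PROFILE MATRIX IS CREATED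
--         profile = [[1 for nt in range(len(alpha))] for position in range(k)]
--
--         for p in range(k):
--             for motif in motifs:
--                 profile[p][alpha.index(motif[p])] += 1
--         return profile
--         #
--
--
--     def Profile_probable_motif(seq, profile):
--
--         """Returns the most probable kmer to add to motifs, given profile matrix """
--
--         kmers = [seq[i:i+k] for i in range(len(seq)-k+1)]
--         best = -1
--
--         for kmer in kmers:
--             prob = 1
--             for p in range(k):
--                 prob = prob * profile[p][alpha.index(kmer[p])]
--             if prob > best:
--                 best = prob
--                 motif = kmer
--         return motif
--         #
--
--
--     def Mismatches(motifs):
--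
--         """ Returns the Hamming distance for  alignment of Motifs in a set from greedy"""
--
--         consensus = [[0 for nt in range(4)] for position in range(k)]
--         for p in range(k):
--             for motif in motifs:
--                 consensus[p][alpha.index(motif[p])] += 1
--
--         mismatches = 0
--         for counts in consensus:
--             for c in range(4):
--                 if c != counts.index(max(counts)):
--                     mismatches += counts[c]
--         return mismatches
--         #
--
--
--     alpha ='ACGT'
--     best_mismatches = float('inf')
--     Best_motifs = []
--
--     for i in range(len(Seqs[0])-k+1):
--         Motifs = [Seqs[0][i:i+k]]
--         for seq in Seqs[1:]:
--             profile = Build_profile_matrix(Motifs, k)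
--             Motif = Profile_probable_motif(seq, profile)
--             Motifs.append(Motif)
--
--         mismatches = Mismatches(Motifs)
--         if  mismatches < best_mismatches:
--             Best_motifs = Motifs
--             best_mismatches = mismatches
--
--     return Best_motifs
-- ===== SOURCE B (Python) =====
-- def Greedy_motif_search_w_pseudocounts(Seqs, k):
--     """Matrix-free greedy motif search: probabilities and scores are computed
--     directly from base counts over the chosen motifs, with no profile/consensus
--     matrices; selection uses max/min with a key (first extremum, as in A)."""
--
--     def prob(kmer, motifs):
--         p = 1
--         for j in range(k):
--             p *= 1 + sum(1 for m in motifs if m[j] == kmer[j])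
--         return p
--
--     def most_probable(seq, motifs):
--         kmers = [seq[i:i + k] for i in range(len(seq) - k + 1)]
--         return max(kmers, key=lambda km: prob(km, motifs))
--
--     def score(motifs):
--         total = 0
--         for j in range(k):
--             counts = [sum(1 for m in motifs if m[j] == b) for b in 'ACGT']
--             total += sum(counts) - max(counts)
--         return total
--
--     def candidate(i):
--         motifs = [Seqs[0][i:i + k]]
--         for seq in Seqs[1:]:
--             motifs.append(most_probable(seq, motifs))
--         return motifs
--
--     cands = [candidate(i) for i in range(len(Seqs[0]) - k + 1)]
--     return min(cands, key=score) if cands else []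
-- ===== Notes on version B (the rewrite author's own statement) =====
-- stated objective: simpler
-- what changed: B eliminates A's profile/consensus matrices entirely: each kmer's probability is the product over positions of 1 + (count of current motifs matching that base), the alignment score is computed per column as total minus max count instead of summing all non-argmax consensus entries, and the best kmer/motif set are picked with max/min over a key (first extremum) instead of running-best loops.
import Mathlib
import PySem

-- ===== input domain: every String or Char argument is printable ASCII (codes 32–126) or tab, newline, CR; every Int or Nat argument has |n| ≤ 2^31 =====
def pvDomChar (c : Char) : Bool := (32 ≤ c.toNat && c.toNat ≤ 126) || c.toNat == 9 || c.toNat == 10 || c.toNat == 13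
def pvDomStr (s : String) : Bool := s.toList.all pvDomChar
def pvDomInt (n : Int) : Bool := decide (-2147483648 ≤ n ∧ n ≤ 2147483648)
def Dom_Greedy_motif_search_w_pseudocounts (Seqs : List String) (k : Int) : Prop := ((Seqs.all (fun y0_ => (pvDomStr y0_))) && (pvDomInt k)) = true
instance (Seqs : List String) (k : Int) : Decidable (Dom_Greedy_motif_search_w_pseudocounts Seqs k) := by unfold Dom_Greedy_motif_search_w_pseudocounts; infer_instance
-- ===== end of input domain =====

-- B drops A's profile/consensus matrices: probabilities and scores are computed directly
-- from base counts over the current motifs, and selection uses max/min with a key (simpler, same cost class).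

-- ===== PORT A =====
-- alpha = 'ACGT'
def pvAlpha : List Char := ['A', 'C', 'G', 'T']

-- alpha.index(c); Python raises ValueError off 'ACGT' (excluded by Pre_); default 4 is out of range, making the write below a no-op
def pvIdxA (c : Char) : Nat := (PySem.List.index? pvAlpha c).getD 4

-- Build_profile_matrix(motifs, k); profile[p][...] += 1 is List.modify (p ≥ 0 from range(k), so p.toNat is exact)
def pvBuildProfile (motifs : List (List Char)) (k : Int) : List (List Int) :=
  let profile := (PySem.List.pyRange 0 k 1).map (fun _ => ([1, 1, 1, 1] : List Int))
  (PySem.List.pyRange 0 k 1).foldl (fun profile p =>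
    motifs.foldl (fun profile motif =>
      profile.modify p.toNat (fun row =>
        row.modify (pvIdxA (PySem.List.pyGetD motif p ' ')) (· + 1))) profile) profile

-- Profile_probable_motif(seq, profile); best = -1, motif initially unbound (first kmer always wins; [] placeholder unreachable under Pre_);
-- profile[p][...] reads are in range under Pre_ (defaults arbitrary)
def pvProbable (seq : List Char) (profile : List (List Int)) (k : Int) : List Char :=
  let kmers := (PySem.List.pyRange 0 ((seq.length : Int) - k + 1) 1).map
    (fun i => PySem.List.slice seq (some i) (some (i + k)))
  (kmers.foldl (fun st kmer =>
    let prob := (PySem.List.pyRange 0 k 1).foldl (fun prob p =>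
      prob * PySem.List.pyGetD (PySem.List.pyGetD profile p [])
        ((pvIdxA (PySem.List.pyGetD kmer p ' ') : Nat) : Int) 0) 1
    if st.1 < prob then (prob, kmer) else st) ((-1 : Int), ([] : List Char))).2

-- Mismatches(motifs); counts.index(max(counts)) recomputed inside the loop, as in A
def pvMismatches (motifs : List (List Char)) (k : Int) : Int :=
  let consensus := (PySem.List.pyRange 0 k 1).map (fun _ => ([0, 0, 0, 0] : List Int))
  let consensus := (PySem.List.pyRange 0 k 1).foldl (fun cons p =>
    motifs.foldl (fun cons motif =>
      cons.modify p.toNat (fun row =>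
        row.modify (pvIdxA (PySem.List.pyGetD motif p ' ')) (· + 1))) cons) consensus
  consensus.foldl (fun mismatches counts =>
    (PySem.List.pyRange 0 4 1).foldl (fun mismatches c =>
      if c ≠ (((PySem.List.index? counts ((PySem.List.max? counts (fun x => x)).getD 0)).getD 4 : Nat) : Int)
      then mismatches + PySem.List.pyGetD counts c 0 else mismatches) mismatches) 0

-- best_mismatches = float('inf') is the none state; Seqs[0] on [] raises IndexError (excluded by Pre_)
def Greedy_motif_search_w_pseudocounts (Seqs : List String) (k : Int) : List String :=
  let S := Seqs.map String.toList
  let s0 := PySem.List.pyGetD S 0 []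
  ((PySem.List.pyRange 0 ((s0.length : Int) - k + 1) 1).foldl (fun st i =>
    let motifs := (PySem.List.slice S (some 1) none).foldl (fun motifs seq =>
      motifs ++ [pvProbable seq (pvBuildProfile motifs k) k])
      [PySem.List.slice s0 (some i) (some (i + k))]
    let mismatches := pvMismatches motifs k
    match st.1 with
    | none => (some mismatches, motifs)
    | some best => if mismatches < best then (some mismatches, motifs) else st)
    ((none : Option Int), ([] : List (List Char)))).2.map (fun m => String.ofList m)

-- ===== PORT B =====
-- prob(kmer, motifs): product over j < k of 1 + #{m in motifs with m[j] == kmer[j]} (no matrix)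
def pvProbB (kmer : List Char) (motifs : List (List Char)) (k : Int) : Int :=
  (PySem.List.pyRange 0 k 1).foldl (fun p j =>
    p * (1 + (motifs.countP (fun m =>
      PySem.List.pyGetD m j ' ' == PySem.List.pyGetD kmer j ' ') : Int))) 1

-- most_probable(seq, motifs) = max(kmers, key=prob); max() on an empty list raises (excluded by Pre_)
def pvMostProbable (seq : List Char) (motifs : List (List Char)) (k : Int) : List Char :=
  let kmers := (PySem.List.pyRange 0 ((seq.length : Int) - k + 1) 1).map
    (fun i => PySem.List.slice seq (some i) (some (i + k)))
  (PySem.List.max? kmers (fun km => pvProbB km motifs k)).getD []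

-- score(motifs): sum over positions of (column total - column max), straight from counts
def pvScore (motifs : List (List Char)) (k : Int) : Int :=
  (PySem.List.pyRange 0 k 1).foldl (fun total j =>
    let counts := (['A', 'C', 'G', 'T'] : List Char).map (fun b =>
      (motifs.countP (fun m => PySem.List.pyGetD m j ' ' == b) : Int))
    total + (counts.sum - (PySem.List.max? counts (fun x => x)).getD 0)) 0

-- candidate(i): greedy extension of the i-th starting kmer
def pvCandidate (S : List (List Char)) (s0 : List Char) (i : Int) (k : Int) : List (List Char) :=
  (PySem.List.slice S (some 1) none).foldl (fun motifs seq =>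
    motifs ++ [pvMostProbable seq motifs k])
    [PySem.List.slice s0 (some i) (some (i + k))]

def Greedy_motif_search_w_pseudocounts_alt (Seqs : List String) (k : Int) : List String :=
  let S := Seqs.map String.toList
  let s0 := PySem.List.pyGetD S 0 []
  let cands := (PySem.List.pyRange 0 ((s0.length : Int) - k + 1) 1).map (fun i => pvCandidate S s0 i k)
  match PySem.List.min? cands (fun ms => pvScore ms k) with
  | some best => best.map (fun m => String.ofList m)
  | none => []

-- ===== PRECONDITION & SPEC =====
-- Pre_ = exactly the inputs where A returns: Seqs nonempty (else IndexError on Seqs[0]), and either k ≤ 0 or the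
-- first string is too short for any kmer (loop body never runs) or every string is long enough and over 'ACGT'
-- (otherwise alpha.index raises ValueError, or an empty kmer list leaves `motif` unbound).
def Pre_Greedy_motif_search_w_pseudocounts (Seqs : List String) (k : Int) : Prop :=
  Seqs ≠ [] ∧ (k ≤ 0 ∨ (((Seqs.getD 0 "").toList.length : Int) < k ∨
    ((∀ s ∈ Seqs, k ≤ (s.toList.length : Int)) ∧
      ∀ s ∈ Seqs, s.toList.all (fun c => c == 'A' || c == 'C' || c == 'G' || c == 'T') = true)))
instance (Seqs : List String) (k : Int) : Decidable (Pre_Greedy_motif_search_w_pseudocounts Seqs k) := by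
  unfold Pre_Greedy_motif_search_w_pseudocounts; infer_instance

def pvWitness_Greedy_motif_search_w_pseudocounts : List String × Int := (["ACGT", "TGCA"], 2)

def Spec_Greedy_motif_search_w_pseudocounts (Seqs : List String) (k : Int) (out : List String) : Prop :=
  out = Greedy_motif_search_w_pseudocounts_alt Seqs k
instance (Seqs : List String) (k : Int) (out : List String) : Decidable (Spec_Greedy_motif_search_w_pseudocounts Seqs k out) := by
  unfold Spec_Greedy_motif_search_w_pseudocounts; infer_instance

-- ===== CLAIM (what is proved, stated in full; the proofs are below) =====
def Claim_equal_Greedy_motif_search_w_pseudocounts : Prop := ∀ (Seqs : List String) (k : Int), Dom_Greedy_motif_search_w_pseudocounts Seqs k → Pre_Greedy_motif_search_w_pseudocounts Seqs k → Spec_Greedy_motif_search_w_pseudocounts Seqs k (Greedy_motif_search_w_pseudocounts Seqs k)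

-- ===== LEMMAS AND PROOFS =====

-- empty range for k ≤ 0
lemma pvRange_nonpos {k : Int} (hk : k ≤ 0) : PySem.List.pyRange 0 k 1 = [] := by
  simp [PySem.List.pyRange]; omega

def pvCnt (motifs : List (List Char)) (p : Int) (x : Char) : Int :=
  (motifs.countP (fun m => PySem.List.pyGetD m p ' ' == x) : Int)
def pvRowF (motifs : List (List Char)) (p : Int) (init : List Int) : List Int :=
  motifs.foldl (fun r m => r.modify (pvIdxA (PySem.List.pyGetD m p ' ')) (· + 1)) init
lemma pvIdxA_other {c : Char} (h1 : c ≠ 'A') (h2 : c ≠ 'C') (h3 : c ≠ 'G') (h4 : c ≠ 'T') :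
    pvIdxA c = 4 := by
  simp [pvIdxA, pvAlpha, PySem.List.index?, List.idxOf?, List.findIdx?_cons, beq_iff_eq,
    Ne.symm h1, Ne.symm h2, Ne.symm h3, Ne.symm h4]

lemma pvRowF_eq (motifs : List (List Char)) (p : Int) :
    ∀ (a b c d : Int), pvRowF motifs p [a, b, c, d] =
      [a + pvCnt motifs p 'A', b + pvCnt motifs p 'C', c + pvCnt motifs p 'G', d + pvCnt motifs p 'T'] := by
  induction motifs with
  | nil => intro a b c d; simp [pvRowF, pvCnt]
  | cons m ms ih =>
    intro a b c d
    have hcnt : ∀ x : Char, pvCnt (m :: ms) p x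
        = pvCnt ms p x + (if PySem.List.pyGetD m p ' ' = x then 1 else 0) := by
      intro x
      by_cases h : PySem.List.pyGetD m p ' ' = x <;>
        simp [pvCnt, List.countP_cons, h]
    simp only [pvRowF, List.foldl_cons]
    set ch := PySem.List.pyGetD m p ' ' with hch
    by_cases h0 : ch = 'A'
    · rw [h0, show pvIdxA 'A' = 0 by decide,
        show ([a, b, c, d] : List Int).modify 0 (· + 1) = [a + 1, b, c, d] from rfl]
      rw [show (List.foldl (fun r m => r.modify (pvIdxA (PySem.List.pyGetD m p ' ')) (· + 1)) [a + 1, b, c, d] ms) = pvRowF ms p [a + 1, b, c, d] from rfl, ih]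
      simp [hcnt, h0, List.cons.injEq]
      omega
    by_cases h1 : ch = 'C'
    · rw [h1, show pvIdxA 'C' = 1 by decide,
        show ([a, b, c, d] : List Int).modify 1 (· + 1) = [a, b + 1, c, d] from rfl]
      rw [show (List.foldl (fun r m => r.modify (pvIdxA (PySem.List.pyGetD m p ' ')) (· + 1)) [a, b + 1, c, d] ms) = pvRowF ms p [a, b + 1, c, d] from rfl, ih]
      simp [hcnt, h1, List.cons.injEq]
      omega
    by_cases h2 : ch = 'G'
    · rw [h2, show pvIdxA 'G' = 2 by decide,
        show ([a, b, c, d] : List Int).modify 2 (· + 1) = [a, b, c + 1, d] from rfl]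
      rw [show (List.foldl (fun r m => r.modify (pvIdxA (PySem.List.pyGetD m p ' ')) (· + 1)) [a, b, c + 1, d] ms) = pvRowF ms p [a, b, c + 1, d] from rfl, ih]
      simp [hcnt, h2, List.cons.injEq]
      omega
    by_cases h3 : ch = 'T'
    · rw [h3, show pvIdxA 'T' = 3 by decide,
        show ([a, b, c, d] : List Int).modify 3 (· + 1) = [a, b, c, d + 1] from rfl]
      rw [show (List.foldl (fun r m => r.modify (pvIdxA (PySem.List.pyGetD m p ' ')) (· + 1)) [a, b, c, d + 1] ms) = pvRowF ms p [a, b, c, d + 1] from rfl, ih]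
      simp [hcnt, h3, List.cons.injEq]
      omega
    · rw [pvIdxA_other h0 h1 h2 h3,
        show ([a, b, c, d] : List Int).modify 4 (· + 1) = [a, b, c, d] from rfl]
      rw [show (List.foldl (fun r m => r.modify (pvIdxA (PySem.List.pyGetD m p ' ')) (· + 1)) ([a, b, c, d] : List Int) ms) = pvRowF ms p [a, b, c, d] from rfl, ih]
      simp [hcnt, h0, h1, h2, h3, List.cons.injEq]

lemma pvModify_cons_succ {α : Type} (a : α) (t : List α) (n : Nat) (f : α → α) :
    (a :: t).modify (n + 1) f = a :: t.modify n f := by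
  simp [List.modify]

lemma pvModify_modify {α : Type} (f g : α → α) :
    ∀ (p : Nat) (M : List α), (M.modify p f).modify p g = M.modify p (fun x => g (f x)) := by
  intro p M
  induction M generalizing p with
  | nil => simp
  | cons a t ih =>
    cases p with
    | zero => rfl
    | succ n => simp only [pvModify_cons_succ, ih]

lemma foldl_modify_same {α β : Type} (l : List β) (g : β → α → α) (p : Nat) :
    ∀ (M : List α), l.foldl (fun M m => M.modify p (g m)) M
      = M.modify p (fun row => l.foldl (fun r m => g m r) row) := by
  induction l with
  | nil =>
    intro M
    simp only [List.foldl_nil]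
    rw [show (fun (row : α) => row) = id from rfl, List.modify_id]
  | cons m ms ih =>
    intro M
    simp only [List.foldl_cons, ih, pvModify_modify]

lemma foldl_modify_succ {α : Type} (l : List Nat) (H : Nat → α → α) :
    ∀ (a : α) (t : List α), l.foldl (fun M p => M.modify (p + 1) (H p)) (a :: t)
      = a :: l.foldl (fun M p => M.modify p (H p)) t := by
  induction l with
  | nil => intro a t; rfl
  | cons q l ih => intro a t; simp only [List.foldl_cons, pvModify_cons_succ, ih]

lemma foldl_modify_range {α : Type} :
    ∀ (n : Nat) (F : Nat → α → α) (c : α),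
      (List.range n).foldl (fun M p => M.modify p (F p)) (List.replicate n c)
        = (List.range n).map (fun p => F p c) := by
  intro n
  induction n with
  | zero => intro F c; rfl
  | succ n ih =>
    intro F c
    rw [List.range_succ_eq_map, List.replicate_succ]
    simp only [List.foldl_cons, List.foldl_map, List.map_cons, List.map_map]
    rw [show ((c :: List.replicate n c).modify 0 (F 0)) = F 0 c :: List.replicate n c from rfl]
    rw [show (fun (M : List α) (p : Nat) => M.modify p.succ (F p.succ)) = (fun (M : List α) (p : Nat) => M.modify (p + 1) ((fun q => F (q + 1)) p)) from rfl]
    rw [foldl_modify_succ, ih (fun q => F (q + 1)) c]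
    rfl

lemma foldl_mul_pos {α : Type} (l : List α) (g : α → Int) (h : ∀ x ∈ l, 0 < g x) :
    ∀ acc : Int, 0 < acc → 0 < l.foldl (fun p x => p * g x) acc := by
  induction l with
  | nil => intro acc ha; simpa using ha
  | cons x t ih =>
    intro acc ha
    simp only [List.foldl_cons]
    exact ih (fun y hy => h y (List.mem_cons_of_mem _ hy)) _
      (mul_pos ha (h x (List.mem_cons_self)))

def pvMaxStep {α : Type} (f : α → Int) (acc : Option α) (x : α) : Option α :=
  match acc with
  | none => some x
  | some mm => if f mm < f x then some x else some mm

lemma pvMax?_eq {α : Type} (l : List α) (f : α → Int) :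
    PySem.List.max? l f = l.foldl (pvMaxStep f) none := rfl

def pvMinStep {α : Type} (g : α → Int) (acc : Option α) (x : α) : Option α :=
  match acc with
  | none => some x
  | some mm => if g x < g mm then some x else some mm

lemma pvMin?_eq {α : Type} (l : List α) (g : α → Int) :
    PySem.List.min? l g = l.foldl (pvMinStep g) none := rfl

lemma foldl_opt_isSome {α : Type} (f : α → Int) :
    ∀ (t : List α) (m : α), ∃ M, t.foldl (pvMaxStep f) (some m) = some M := by
  intro t
  induction t with
  | nil => intro m; exact ⟨m, rfl⟩
  | cons y t ih =>
    intro m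
    simp only [List.foldl_cons]
    by_cases h : f m < f y
    · simpa [pvMaxStep, h] using ih y
    · simpa [pvMaxStep, h] using ih m

lemma foldl_best_max_aux {α : Type} (f : α → Int) :
    ∀ (t : List α) (m : α),
      t.foldl (fun st x => if st.1 < f x then (f x, x) else st) (f m, m)
        = (match t.foldl (pvMaxStep f) (some m) with
          | some M => (f M, M)
          | none => (f m, m)) := by
  intro t
  induction t with
  | nil => intro m; rfl
  | cons y t ih =>
    intro m
    simp only [List.foldl_cons]
    by_cases h : f m < f y
    · obtain ⟨M, hM⟩ := foldl_opt_isSome f t y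
      simp only [pvMaxStep, h, if_true, ih y, hM]
    · simp only [pvMaxStep, h, if_false, ih m]


lemma foldl_best_max {α : Type} (l : List α) (f : α → Int) (d : α)
    (h : ∀ x ∈ l, 0 < f x) :
    (l.foldl (fun st x => if st.1 < f x then (f x, x) else st) ((-1 : Int), d)).2
      = (PySem.List.max? l f).getD d := by
  cases l with
  | nil => rfl
  | cons x t =>
    have hx : (-1 : Int) < f x := lt_trans (by norm_num) (h x List.mem_cons_self)
    rw [pvMax?_eq]
    simp only [List.foldl_cons, if_pos hx]
    obtain ⟨M, hM⟩ := foldl_opt_isSome f t x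
    rw [foldl_best_max_aux f t x, show pvMaxStep f none x = some x from rfl, hM]
    simp

lemma foldl_min_opt_isSome {α : Type} (g : α → Int) :
    ∀ (t : List α) (m : α), ∃ M, t.foldl (pvMinStep g) (some m) = some M := by
  intro t
  induction t with
  | nil => intro m; exact ⟨m, rfl⟩
  | cons y t ih =>
    intro m
    simp only [List.foldl_cons]
    by_cases h : g y < g m
    · simpa [pvMinStep, h] using ih y
    · simpa [pvMinStep, h] using ih m

lemma foldl_best_min_aux {α : Type} (g : α → Int) :
    ∀ (t : List α) (m : α),
      t.foldl (fun st x =>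
          match st.1 with
          | none => (some (g x), x)
          | some best => if g x < best then (some (g x), x) else st) ((some (g m) : Option Int), m)
        = (match t.foldl (pvMinStep g) (some m) with
          | some M => (some (g M), M)
          | none => (some (g m), m)) := by
  intro t
  induction t with
  | nil => intro m; rfl
  | cons y t ih =>
    intro m
    simp only [List.foldl_cons]
    by_cases h : g y < g m
    · obtain ⟨M, hM⟩ := foldl_min_opt_isSome g t y
      simp only [pvMinStep, h, if_true, ih y, hM]
    · simp only [pvMinStep, h, if_false, ih m]


lemma foldl_best_min {α : Type} (l : List α) (g : α → Int) (d : α) :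
    (l.foldl (fun st x =>
        match st.1 with
        | none => (some (g x), x)
        | some best => if g x < best then (some (g x), x) else st)
      ((none : Option Int), d)).2
      = (PySem.List.min? l g).getD d := by
  cases l with
  | nil => rfl
  | cons x t =>
    rw [pvMin?_eq]
    simp only [List.foldl_cons]
    obtain ⟨M, hM⟩ := foldl_min_opt_isSome g t x
    rw [show pvMinStep g none x = some x from rfl]
    rw [foldl_best_min_aux g t x, hM]
    simp

set_option maxHeartbeats 1000000 in
lemma row4 (a b c d mis : Int) :
    (PySem.List.pyRange 0 4 1).foldl (fun mis c' =>
        if c' ≠ (((PySem.List.index? [a, b, c, d] ((PySem.List.max? [a, b, c, d] (fun x => x)).getD 0)).getD 4 : Nat) : Int)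
        then mis + PySem.List.pyGetD [a, b, c, d] c' 0 else mis) mis
      = mis + (a + b + c + d - max (max (max a b) c) d) := by
  have hmx : (PySem.List.max? [a, b, c, d] (fun x => x)).getD 0 = max (max (max a b) c) d := by
    rw [PySem.List.max?_id_cons]
    simp [List.foldl]
  set mx := max (max (max a b) c) d with hmxdef
  have hrange : PySem.List.pyRange 0 4 1 = [0, 1, 2, 3] := by decide
  rw [hrange, hmx]
  by_cases ha : a = mx
  · have hidx : PySem.List.index? [a, b, c, d] mx = some 0 := by
      rw [← ha]; exact PySem.List.index?_cons_self _ _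
    simp only [List.foldl, hidx, Option.getD_some]
    simp [pysem]
    omega
  · by_cases hb : b = mx
    · have hidx : PySem.List.index? [a, b, c, d] mx = some 1 := by
        rw [PySem.List.index?_cons_of_ne _ ha, ← hb, PySem.List.index?_cons_self]; rfl
      simp only [List.foldl, hidx, Option.getD_some]
      simp [pysem]
      omega
    · by_cases hc : c = mx
      · have hidx : PySem.List.index? [a, b, c, d] mx = some 2 := by
          rw [PySem.List.index?_cons_of_ne _ ha, PySem.List.index?_cons_of_ne _ hb, ← hc,
            PySem.List.index?_cons_self]; rfl
        simp only [List.foldl, hidx, Option.getD_some]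
        simp [pysem]
        omega
      · have hd : d = mx := by
          rcases PySem.List.foldl_max_mem [b, c, d] a with h | h
          · have : mx = a := by rw [hmxdef]; simpa [List.foldl] using h
            exact absurd this.symm ha
          · have hmem : mx ∈ [b, c, d] := by
              have : List.foldl max a [b, c, d] = mx := by simp [List.foldl, hmxdef]
              rwa [this] at h
            simp only [List.mem_cons, List.mem_singleton] at hmem
            rcases hmem with h | h | h
            · exact absurd h.symm hb
            · exact absurd h.symm hc
            · simp only [List.mem_cons, List.not_mem_nil, or_false, List.mem_singleton] at h
              exact h.symm
        have hidx : PySem.List.index? [a, b, c, d] mx = some 3 := by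
          rw [PySem.List.index?_cons_of_ne _ ha, PySem.List.index?_cons_of_ne _ hb,
            PySem.List.index?_cons_of_ne _ hc, ← hd, PySem.List.index?_cons_self]; rfl
        simp only [List.foldl, hidx, Option.getD_some]
        simp [pysem]
        omega

lemma build_eq (motifs : List (List Char)) (k : Int) (r0 : List Int) :
    (PySem.List.pyRange 0 k 1).foldl (fun cons p =>
        motifs.foldl (fun cons motif =>
          cons.modify p.toNat (fun row =>
            row.modify (pvIdxA (PySem.List.pyGetD motif p ' ')) (· + 1))) cons)
      ((PySem.List.pyRange 0 k 1).map (fun _ => r0))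
    = (PySem.List.pyRange 0 k 1).map (fun p => pvRowF motifs p r0) := by
  by_cases hk : k ≤ 0
  · simp [pvRange_nonpos hk]
  · push_neg at hk
    obtain ⟨n, hn⟩ : ∃ n : Nat, k = (n : Int) := ⟨k.toNat, (Int.toNat_of_nonneg (le_of_lt hk)).symm⟩
    subst hn
    rw [PySem.List.pyRange_zero_natCast n]
    rw [show ((List.map (fun (j : Nat) => (j : Int)) (List.range n)).map (fun _ => r0))
        = List.replicate n r0 by rw [List.map_const']; simp]
    rw [List.foldl_map]
    simp only [Int.toNat_natCast]
    have hstep : (fun (x : List (List Int)) (y : Nat) =>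
        motifs.foldl (fun cons motif => cons.modify y (fun row =>
          row.modify (pvIdxA (PySem.List.pyGetD motif (y : Int) ' ')) (· + 1))) x)
      = (fun (x : List (List Int)) (y : Nat) => x.modify y (fun row =>
          motifs.foldl (fun (r : List Int) m =>
            r.modify (pvIdxA (PySem.List.pyGetD m (y : Int) ' ')) (· + 1)) row)) := by
      funext x y
      exact foldl_modify_same motifs (fun m row =>
        row.modify (pvIdxA (PySem.List.pyGetD m (y : Int) ' ')) (· + 1)) y x
    rw [hstep]
    rw [foldl_modify_range n (fun (y : Nat) (row : List Int) =>
        motifs.foldl (fun (r : List Int) m =>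
          r.modify (pvIdxA (PySem.List.pyGetD m (y : Int) ' ')) (· + 1)) row) r0]
    rw [List.map_map]
    rfl


-- positivity of B's probability
lemma pvProbB_pos (kmer : List Char) (motifs : List (List Char)) (k : Int) :
    0 < pvProbB kmer motifs k := by
  apply foldl_mul_pos
  · intro x hx
    have : (0 : Int) ≤ (motifs.countP (fun m =>
        PySem.List.pyGetD m x ' ' == PySem.List.pyGetD kmer x ' ') : Int) := Int.natCast_nonneg _
    omega
  · norm_num

-- A's profile-driven kmer probability equals B's count product
lemma prob_eq (motifs : List (List Char)) (k : Int) (kmer : List Char)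
    (h : k ≤ 0 ∨ (kmer.length = k.toNat ∧ ∀ c ∈ kmer, c ∈ pvAlpha)) :
    (PySem.List.pyRange 0 k 1).foldl (fun prob p =>
        prob * PySem.List.pyGetD (PySem.List.pyGetD (pvBuildProfile motifs k) p [])
          ((pvIdxA (PySem.List.pyGetD kmer p ' ') : Nat) : Int) 0) 1
      = pvProbB kmer motifs k := by
  have hb : pvBuildProfile motifs k
      = (PySem.List.pyRange 0 k 1).map (fun p => pvRowF motifs p [1, 1, 1, 1]) := by
    simp only [pvBuildProfile]
    exact build_eq motifs k [1, 1, 1, 1]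
  unfold pvProbB
  apply PySem.List.foldl_congr_mem
  intro acc p hp
  obtain ⟨hp0, hpk⟩ := PySem.List.mem_pyRange_one.mp hp
  rcases h with hk | ⟨hlen, hch⟩
  · exfalso; omega
  · have hchm : PySem.List.pyGetD kmer p ' ' ∈ kmer := by
      apply PySem.List.pyGetD_mem
      constructor <;> omega
    have hmem := hch _ hchm
    rw [hb, PySem.List.pyGetD_map_pyRange_of_nonneg _ k p [] hp0 hpk, pvRowF_eq motifs p 1 1 1 1]
    simp only [pvAlpha, List.mem_cons, List.not_mem_nil, or_false] at hmem
    rcases hmem with hc | hc | hc | hc <;> rw [hc] <;> rfl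

lemma probable_eq (seq : List Char) (motifs : List (List Char)) (k : Int)
    (h : k ≤ 0 ∨ (k ≤ (seq.length : Int) ∧ ∀ c ∈ seq, c ∈ pvAlpha)) :
    pvProbable seq (pvBuildProfile motifs k) k = pvMostProbable seq motifs k := by
  simp only [pvProbable, pvMostProbable]
  rw [PySem.List.foldl_congr_mem _ _
    (fun (st : Int × List Char) kmer =>
      if st.1 < pvProbB kmer motifs k then (pvProbB kmer motifs k, kmer) else st) _ ?_]
  · exact foldl_best_max _ _ _ (fun x _ => pvProbB_pos x motifs k)
  · intro acc kmer hk
    obtain ⟨i, hi, hkm⟩ := List.mem_map.mp hk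
    obtain ⟨hi0, hiu⟩ := PySem.List.mem_pyRange_one.mp hi
    have hkey : (PySem.List.pyRange 0 k 1).foldl (fun prob p =>
        prob * PySem.List.pyGetD (PySem.List.pyGetD (pvBuildProfile motifs k) p [])
          ((pvIdxA (PySem.List.pyGetD kmer p ' ') : Nat) : Int) 0) 1
        = pvProbB kmer motifs k := by
      apply prob_eq
      by_cases hkneg : k ≤ 0
      · exact Or.inl hkneg
      · rcases h with hk' | ⟨hlen, hch⟩
        · exact Or.inl hk'
        · right
          constructor
          · subst hkm
            rw [PySem.List.slice_toNat seq hi0 (by omega)]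
            simp only [List.length_take, List.length_drop]
            omega
          · intro c hc
            subst hkm
            exact hch c (PySem.List.mem_of_mem_slice seq _ _ hc)
    rw [hkey]

lemma mismatches_eq (motifs : List (List Char)) (k : Int) :
    pvMismatches motifs k = pvScore motifs k := by
  simp only [pvMismatches, pvScore]
  rw [build_eq motifs k [0, 0, 0, 0], List.foldl_map]
  apply PySem.List.foldl_congr_mem
  intro acc p _
  rw [pvRowF_eq motifs p 0 0 0 0]
  simp only [zero_add]
  rw [row4 (pvCnt motifs p 'A') (pvCnt motifs p 'C') (pvCnt motifs p 'G') (pvCnt motifs p 'T') acc]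
  have hmax : (PySem.List.max? [pvCnt motifs p 'A', pvCnt motifs p 'C', pvCnt motifs p 'G', pvCnt motifs p 'T'] (fun x => x)).getD 0
      = max (max (max (pvCnt motifs p 'A') (pvCnt motifs p 'C')) (pvCnt motifs p 'G')) (pvCnt motifs p 'T') := by
    rw [PySem.List.max?_id_cons]
    simp [List.foldl]
  rw [show ((['A', 'C', 'G', 'T'] : List Char).map (fun b =>
      (motifs.countP (fun m => PySem.List.pyGetD m p ' ' == b) : Int)))
      = [pvCnt motifs p 'A', pvCnt motifs p 'C', pvCnt motifs p 'G', pvCnt motifs p 'T'] from rfl]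
  rw [hmax]
  simp [List.sum_cons]
  ring

lemma candidate_eq (S : List (List Char)) (s0 : List Char) (i k : Int)
    (h : ∀ seq ∈ PySem.List.slice S (some 1) none,
      k ≤ 0 ∨ (k ≤ (seq.length : Int) ∧ ∀ c ∈ seq, c ∈ pvAlpha)) :
    (PySem.List.slice S (some 1) none).foldl (fun motifs seq =>
        motifs ++ [pvProbable seq (pvBuildProfile motifs k) k])
      [PySem.List.slice s0 (some i) (some (i + k))]
      = pvCandidate S s0 i k := by
  simp only [pvCandidate]
  apply PySem.List.foldl_congr_mem
  intro acc seq hseq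
  rw [probable_eq seq acc k (h seq hseq)]

lemma outer_min (L : List Int) (cand : Int → List (List Char)) (k : Int) :
    (L.foldl (fun st i =>
        match st.1 with
        | none => (some (pvMismatches (cand i) k), cand i)
        | some best => if pvMismatches (cand i) k < best then (some (pvMismatches (cand i) k), cand i) else st)
      ((none : Option Int), ([] : List (List Char)))).2
    = (PySem.List.min? (L.map cand) (fun ms => pvMismatches ms k)).getD [] := by
  have h := foldl_best_min (L.map cand) (fun ms => pvMismatches ms k) []
  rw [List.foldl_map] at h
  exact h

theorem Greedy_motif_search_w_pseudocounts_spec : Claim_equal_Greedy_motif_search_w_pseudocounts := by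
  intro Seqs k hdom hpre
  unfold Spec_Greedy_motif_search_w_pseudocounts
  obtain ⟨hne, hcase⟩ := hpre
  obtain ⟨s, rest, rfl⟩ : ∃ s rest, Seqs = s :: rest := by
    cases Seqs with
    | nil => exact absurd rfl hne
    | cons s rest => exact ⟨s, rest, rfl⟩
  simp only [Greedy_motif_search_w_pseudocounts, Greedy_motif_search_w_pseudocounts_alt,
    List.map_cons, PySem.List.pyGetD_zero_cons]
  have hcond : (∀ seq ∈ PySem.List.slice (s.toList :: rest.map String.toList) (some 1) none,
        k ≤ 0 ∨ (k ≤ (seq.length : Int) ∧ ∀ c ∈ seq, c ∈ pvAlpha))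
      ∨ ((s.toList.length : Int) - k + 1 ≤ 0) := by
    rcases hcase with hk0 | hshort | ⟨hlens, hchars⟩
    · exact Or.inl (fun seq _ => Or.inl hk0)
    · right
      simp only [List.getD_cons_zero] at hshort
      omega
    · left
      intro seq hseq
      right
      rw [PySem.List.slice_from_one, List.tail_cons] at hseq
      obtain ⟨t, ht, rfl⟩ := List.mem_map.mp hseq
      refine ⟨hlens t (List.mem_cons_of_mem _ ht), fun c hc => ?_⟩
      have h' := List.all_eq_true.mp (hchars t (List.mem_cons_of_mem _ ht)) c hc
      simp only [Bool.or_eq_true, beq_iff_eq] at h'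
      simp only [pvAlpha, List.mem_cons, List.not_mem_nil, or_false]
      tauto
  rcases hcond with hcond | hempty
  · rw [outer_min _ (fun i =>
      (PySem.List.slice (s.toList :: rest.map String.toList) (some 1) none).foldl (fun motifs seq =>
        motifs ++ [pvProbable seq (pvBuildProfile motifs k) k])
        [PySem.List.slice s.toList (some i) (some (i + k))]) k]
    rw [List.map_congr_left (fun i _ => candidate_eq (s.toList :: rest.map String.toList) s.toList i k hcond)]
    rw [show (fun ms => pvMismatches ms k) = (fun ms => pvScore ms k) from funext (fun ms => mismatches_eq ms k)]
    cases hmin : PySem.List.min? ((PySem.List.pyRange 0 ((s.toList.length : Int) - k + 1) 1).map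
        (fun i => pvCandidate (s.toList :: rest.map String.toList) s.toList i k)) (fun ms => pvScore ms k) with
    | none => simp
    | some best => simp
  · rw [pvRange_nonpos hempty]
    rfl
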